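-- pv_equiv track=rewrite | github.com/gbcolborne/ner_eval | text_utils/text_utils.py | squeeze_string
-- ===== SOURCE A (Python) =====
-- def squeeze_string(word, max_repeats=0):
--     """ Remove repeated characters in string. """
--     squeezed = ""
--     prev = None
--     nb_repeats = 0
--     for char in word:
--         if char == prev:
--             nb_repeats += 1
--         else:
--             nb_repeats = 0
--         if nb_repeats <= max_repeats:
--             squeezed += char
--         prev = char
--     return squeezed
-- ===== SOURCE B (Python) =====
-- def squeeze_string(word, max_repeats=0):
--     """ Remove repeated characters in string. """
--     keep = max_repeats + 1
--     pieces = []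
--     i, n = 0, len(word)
--     while i < n:
--         j = i
--         while j < n and word[j] == word[i]:
--             j += 1
--         pieces.append(word[i] * min(j - i, keep))
--         i = j
--     return ''.join(pieces)
-- ===== Notes on version B (the rewrite author's own statement) =====
-- stated objective: alternative
-- what changed: B decomposes the string into maximal runs of equal characters with a two-pointer scan and keeps min(run length, max_repeats+1) of each, instead of A's per-character prev/nb_repeats state machine.
import Mathlib
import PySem

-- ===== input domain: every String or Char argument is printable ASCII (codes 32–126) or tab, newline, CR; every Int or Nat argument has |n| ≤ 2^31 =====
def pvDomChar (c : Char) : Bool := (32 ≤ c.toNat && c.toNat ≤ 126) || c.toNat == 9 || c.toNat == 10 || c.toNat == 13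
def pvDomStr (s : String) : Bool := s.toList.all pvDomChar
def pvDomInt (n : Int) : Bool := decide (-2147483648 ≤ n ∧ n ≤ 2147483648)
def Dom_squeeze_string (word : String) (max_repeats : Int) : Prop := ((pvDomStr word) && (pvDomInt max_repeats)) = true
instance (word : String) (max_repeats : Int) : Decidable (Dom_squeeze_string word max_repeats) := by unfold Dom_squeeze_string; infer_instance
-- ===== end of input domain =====

-- B replaces A's per-character prev/nb_repeats state machine by a run-based scan:
-- split into maximal runs of equal characters and keep min(run length, max_repeats+1) of each
-- (objective: alternative decomposition, same cost).

-- ===== PORT A =====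
-- A's for-loop over the characters, with state (squeezed, prev, nb_repeats).
def pvALoop (mr : Int) : List Char → List Char → Option Char → Int → List Char
  | [], acc, _, _ => acc
  | c :: cs, acc, prev, nb =>
    let nb' := if prev = some c then nb + 1 else 0
    let acc' := if nb' ≤ mr then acc ++ [c] else acc
    pvALoop mr cs acc' (some c) nb'

def squeeze_string (word : String) (max_repeats : Int) : String :=
  String.ofList (pvALoop max_repeats word.toList [] none 0)

-- ===== PORT B =====
-- inner while-loop of B: length of the maximal leading run of c, and the rest.
def pvTakeRun (c : Char) : List Char → Nat × List Char
  | [] => (0, [])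
  | x :: xs => if x = c then let p := pvTakeRun c xs; (p.1 + 1, p.2) else (0, x :: xs)

theorem pvTakeRun_len (c : Char) : ∀ cs : List Char, (pvTakeRun c cs).2.length ≤ cs.length
  | [] => Nat.le_refl _
  | x :: xs => by
    simp only [pvTakeRun]
    split
    · exact Nat.le_succ_of_le (pvTakeRun_len c xs)
    · exact Nat.le_refl _

-- outer while-loop of B: one run per step, keep min(L, max_repeats+1) characters.
def pvBRuns (mr : Int) : List Char → List Char
  | [] => []
  | c :: cs =>
    let p := pvTakeRun c cs
    List.replicate (min ((p.1 : Int) + 1) (mr + 1)).toNat c ++ pvBRuns mr p.2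
termination_by l => l.length
decreasing_by
  simpa using Nat.lt_succ_of_le (pvTakeRun_len c cs)

def squeeze_string_alt (word : String) (max_repeats : Int) : String :=
  String.ofList (pvBRuns max_repeats word.toList)

-- ===== PRECONDITION & SPEC =====
def Spec_squeeze_string (word : String) (max_repeats : Int) (out : String) : Prop := out = squeeze_string_alt word max_repeats
instance (word : String) (max_repeats : Int) (out : String) : Decidable (Spec_squeeze_string word max_repeats out) := by unfold Spec_squeeze_string; infer_instance

-- ===== CLAIM (what is proved, stated in full; the proofs are below) =====
def Claim_equal_squeeze_string : Prop := ∀ (word : String) (max_repeats : Int), Dom_squeeze_string word max_repeats → Spec_squeeze_string word max_repeats (squeeze_string word max_repeats)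

-- ===== LEMMAS AND PROOFS =====

-- main invariant: in the middle of a run of c with nb previous repeats,
-- A's loop emits min(remaining run length, mr - nb) more copies of c and then agrees with B's runs
theorem pvALoop_run (mr : Int) : ∀ (cs : List Char) (acc : List Char) (c : Char) (nb : Int),
    pvALoop mr cs acc (some c) nb
      = acc ++ List.replicate (min (((pvTakeRun c cs).1 : Int)) (mr - nb)).toNat c
          ++ pvBRuns mr (pvTakeRun c cs).2
  | [], acc, c, nb => by
    simp [pvALoop, pvTakeRun, pvBRuns]
  | x :: xs, acc, c, nb => by
    by_cases hx : x = c
    · subst hx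
      have ih := pvALoop_run mr xs (if nb + 1 ≤ mr then acc ++ [x] else acc) x (nb + 1)
      simp only [pvALoop, pvTakeRun, reduceIte]
      rw [ih]
      by_cases h : nb + 1 ≤ mr
      · have hb : (min (((pvTakeRun x xs).1 : Int) + 1) (mr - nb)).toNat
            = (min (((pvTakeRun x xs).1 : Int)) (mr - (nb + 1))).toNat + 1 := by omega
        simp [h, hb, List.replicate_succ, List.append_assoc]
      · have hb : (min (((pvTakeRun x xs).1 : Int) + 1) (mr - nb)).toNat
            = (min (((pvTakeRun x xs).1 : Int)) (mr - (nb + 1))).toNat := by omega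
        simp [h, hb, List.append_assoc]
    · have hcx : ¬ c = x := fun h => hx h.symm
      have ih := pvALoop_run mr xs (if (0:Int) ≤ mr then acc ++ [x] else acc) x 0
      simp only [pvALoop, pvTakeRun, Option.some.injEq, hcx, if_false, if_neg hx]
      rw [ih]
      have hz : (min ((0:Nat) : Int) (mr - nb)).toNat = 0 := by omega
      rw [hz]
      have h1 : pvBRuns mr (x :: xs)
          = List.replicate (min (((pvTakeRun x xs).1 : Int) + 1) (mr + 1)).toNat x
              ++ pvBRuns mr (pvTakeRun x xs).2 := by
        simp [pvBRuns]
      rw [h1]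
      by_cases h : (0:Int) ≤ mr
      · simp [h, List.append_assoc]
        rw [show (min (((pvTakeRun x xs).1 : Int)) mr + 1).toNat
              = (min (((pvTakeRun x xs).1 : Int)) mr).toNat + 1 from by omega]
        simp [List.replicate_succ]
      · simp [h]
        omega

theorem pvLoop_eq (mr : Int) (l : List Char) : pvALoop mr l [] none 0 = pvBRuns mr l := by
  cases l with
  | nil => simp [pvALoop, pvBRuns]
  | cons c cs =>
    simp only [pvALoop, reduceCtorEq, if_false]
    rw [pvALoop_run]
    have h1 : pvBRuns mr (c :: cs)
        = List.replicate (min (((pvTakeRun c cs).1 : Int) + 1) (mr + 1)).toNat c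
            ++ pvBRuns mr (pvTakeRun c cs).2 := by
      simp [pvBRuns]
    rw [h1]
    by_cases h : (0:Int) ≤ mr
    · simp [h]
      rw [show (min (((pvTakeRun c cs).1 : Int)) mr + 1).toNat
            = (min (((pvTakeRun c cs).1 : Int)) mr).toNat + 1 from by omega]
      simp [List.replicate_succ]
    · simp [h]
      omega

-- ===== VERDICT (by name: the statement is the Claim_ definition above) =====
theorem squeeze_string_spec : Claim_equal_squeeze_string := by
  intro word mr _
  unfold Spec_squeeze_string squeeze_string squeeze_string_alt
  rw [pvLoop_eq]
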